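-- pv_equiv track=rewrite | github.com/seungjlee/GoogleCodeGolf | Reduced/task216.py | p
-- ===== SOURCE A (Python) =====
-- R=range
--
-- L=len
--
-- def p(a):
-- 	K,C=L(a),L(a[0]);E=F=M=N=O=P=0
-- 	for G in R(K):
-- 		H=[0]*C;I=[0]*C
-- 		for D in R(G,K):
-- 			H=[A+(B==2)for(A,B)in zip(H,a[D])];I=[A+(B==0)for(A,B)in zip(I,a[D])];B=J=0
-- 			for A in R(C+1):
-- 				if A<C and I[A]==0:B+=H[A]
-- 				else:
-- 					Q=A-J;S=(D-G+1)*Q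
-- 					if Q and(B>E or B==E and S>F):E,F,M,N,O,P=B,S,G,J,D,A-1
-- 					J=A+1;B=0
-- 	return[A[N:P+1]for A in a[M:O+1]]if F else[]
-- ===== SOURCE B (Python) =====
-- def p(a):
--     K, C = len(a), len(a[0])
--     # summed-area table: S2[r][c] = number of 2s in rows < r, cols < c
--     S2 = [[0] * (C + 1)]
--     for row in a:
--         acc = 0
--         line = [0]
--         for c in range(C):
--             acc += row[c] == 2
--             line.append(acc)
--         S2.append([u + v for u, v in zip(S2[-1], line)])
--     cands = []
--     for G in range(K):
--         blocked = set()
--         for D in range(G, K):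
--             for c in range(C):
--                 if a[D][c] == 0:
--                     blocked.add(c)
--             bounds = [-1] + sorted(blocked) + [C]
--             for l, r in zip(bounds, bounds[1:]):
--                 w = r - l - 1
--                 if w:
--                     tw = S2[D + 1][r] - S2[D + 1][l + 1] - S2[G][r] + S2[G][l + 1]
--                     cands.append((tw, (D - G + 1) * w, G, l + 1, D, r - 1))
--     best = max(cands, key=lambda t: (t[0], t[1]), default=None)
--     if best is None:
--         return []
--     _, _, M, N, O, P = best
--     return [row[N:P + 1] for row in a[M:O + 1]]
-- ===== Notes on version B (the rewrite author's own statement) =====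
-- stated objective: alternative
-- what changed: B replaces A's per-top-row running column accumulators and C+1 sentinel scan with inline six-variable best updates by a 2D summed-area table queried per rectangle, a growing sorted set of zero-blocked columns whose gaps delimit the candidate rectangles, and a single final max(key=(twos,area)) over an explicitly built candidate list.
import Mathlib
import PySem

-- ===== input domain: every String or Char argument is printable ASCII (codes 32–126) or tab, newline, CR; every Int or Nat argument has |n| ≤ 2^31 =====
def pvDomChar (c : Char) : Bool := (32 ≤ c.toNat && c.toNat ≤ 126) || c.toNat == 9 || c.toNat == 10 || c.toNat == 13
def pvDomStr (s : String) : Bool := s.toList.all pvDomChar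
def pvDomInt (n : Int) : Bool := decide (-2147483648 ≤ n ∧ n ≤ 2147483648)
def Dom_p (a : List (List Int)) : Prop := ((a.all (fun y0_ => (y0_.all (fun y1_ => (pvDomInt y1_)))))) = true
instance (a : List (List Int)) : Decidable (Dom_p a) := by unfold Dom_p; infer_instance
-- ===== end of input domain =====

-- B replaces A's per-stripe running column accumulators and C+1 sentinel scan with inline
-- six-variable best tracking by a 2D summed-area table, a growing set of zero-blocked columns
-- whose sorted gaps give the candidate rectangles, and a final max() over the candidate list
-- (objective: alternative; return value only — neither program mutates its argument).

-- ===== PORT A =====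
def p (a : List (List Int)) : List (List Int) :=
  let K : Int := a.length
  let C : Int := (PySem.List.pyGetD a 0 []).length
  let st :=
    (PySem.List.pyRange 0 K).foldl (fun st G =>
      let H0 : List Int := List.replicate C.toNat 0
      let I0 : List Int := List.replicate C.toNat 0
      let r := (PySem.List.pyRange G K).foldl
        (fun (s : List Int × List Int × (Int × Int × Int × Int × Int × Int)) D =>
          let row := PySem.List.pyGetD a D []
          let H := (s.1.zip row).map (fun q => q.1 + (if q.2 == 2 then (1 : Int) else 0))
          let I := (s.2.1.zip row).map (fun q => q.1 + (if q.2 == 0 then (1 : Int) else 0))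
          let inner := (PySem.List.pyRange 0 (C + 1)).foldl
            (fun (t : (Int × Int) × (Int × Int × Int × Int × Int × Int)) A =>
              if A < C ∧ PySem.List.pyGetD I A 0 == 0 then
                ((t.1.1 + PySem.List.pyGetD H A 0, t.1.2), t.2)
              else
                let Q := A - t.1.2
                let S := (D - G + 1) * Q
                if Q ≠ 0 ∧ (t.1.1 > t.2.1 ∨ (t.1.1 = t.2.1 ∧ S > t.2.2.1)) then
                  ((0, A + 1), (t.1.1, S, G, t.1.2, D, A - 1))
                else ((0, A + 1), t.2))
            ((0, 0), s.2.2)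
          (H, I, inner.2))
        (H0, I0, st)
      r.2.2) ((0, 0, 0, 0, 0, 0) : Int × Int × Int × Int × Int × Int)
  if st.2.1 ≠ 0 then
    (PySem.List.slice a (some st.2.2.1) (some (st.2.2.2.2.1 + 1))).map
      (fun r => PySem.List.slice r (some st.2.2.2.1) (some (st.2.2.2.2.2 + 1)))
  else []

-- ===== PORT B =====
def p_alt (a : List (List Int)) : List (List Int) :=
  let K : Int := a.length
  let C : Int := (PySem.List.pyGetD a 0 []).length
  -- summed-area table: S2[r][c] = number of 2s in rows < r, cols < c
  let S2 := a.foldl (fun (S2 : List (List Int)) row =>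
      let al := (PySem.List.pyRange 0 C).foldl
        (fun (s : Int × List Int) c =>
          (s.1 + (if PySem.List.pyGetD row c 0 == 2 then (1 : Int) else 0),
           s.2 ++ [s.1 + (if PySem.List.pyGetD row c 0 == 2 then (1 : Int) else 0)]))
        ((0 : Int), ([0] : List Int))
      S2 ++ [((PySem.List.pyGetD S2 (-1) []).zip al.2).map (fun q => q.1 + q.2)])
    [List.replicate (C.toNat + 1) (0 : Int)]
  let cands := (PySem.List.pyRange 0 K).foldl
    (fun (cs : List (Int × Int × Int × Int × Int × Int)) G =>
      ((PySem.List.pyRange G K).foldl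
        (fun (s : PySem.Set Int × List (Int × Int × Int × Int × Int × Int)) D =>
          let blocked := (PySem.List.pyRange 0 C).foldl
            (fun (b : PySem.Set Int) c =>
              if PySem.List.pyGetD (PySem.List.pyGetD a D []) c 0 == 0 then PySem.Set.add b c
              else b) s.1
          let bounds := [(-1 : Int)] ++ PySem.List.sorted blocked (fun x => x) false ++ [C]
          let cs' := (bounds.zip (bounds.drop 1)).foldl
            (fun cs (pr : Int × Int) =>
              if pr.2 - pr.1 - 1 ≠ 0 then
                cs ++ [(PySem.List.pyGetD (PySem.List.pyGetD S2 (D + 1) []) pr.2 0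
                          - PySem.List.pyGetD (PySem.List.pyGetD S2 (D + 1) []) (pr.1 + 1) 0
                          - PySem.List.pyGetD (PySem.List.pyGetD S2 G []) pr.2 0
                          + PySem.List.pyGetD (PySem.List.pyGetD S2 G []) (pr.1 + 1) 0,
                        (D - G + 1) * (pr.2 - pr.1 - 1), G, pr.1 + 1, D, pr.2 - 1)]
              else cs) s.2
          (blocked, cs')) (PySem.Set.empty, cs)).2) []
  match PySem.List.max2? cands (fun t => t.1) (fun t => t.2.1) with
  | none => []
  | some b =>
    (PySem.List.slice a (some b.2.2.1) (some (b.2.2.2.2.1 + 1))).map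
      (fun r => PySem.List.slice r (some b.2.2.2.1) (some (b.2.2.2.2.2 + 1)))

-- ===== PRECONDITION & SPEC =====
-- A (and B) raise IndexError when a is empty or when some row is shorter than the first row
-- (the zip-truncated column lists are then indexed out of range); Pre_ excludes exactly those.
def Pre_p (a : List (List Int)) : Prop :=
  a ≠ [] ∧ ∀ r ∈ a, (a.headD []).length ≤ r.length
instance (a : List (List Int)) : Decidable (Pre_p a) := by unfold Pre_p; infer_instance

def pvWitness_p : List (List Int) := [[2, 0, 2], [2, 1, 2]]

def Spec_p (a : List (List Int)) (out : List (List Int)) : Prop := out = p_alt a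
instance (a : List (List Int)) (out : List (List Int)) : Decidable (Spec_p a out) := by
  unfold Spec_p; infer_instance

-- ===== CLAIM (what is proved, stated in full; the proofs are below) =====
def Claim_equal_p : Prop := ∀ (a : List (List Int)), Dom_p a → Pre_p a → Spec_p a (p a)

-- ===== LEMMAS AND PROOFS =====

-- indicator and row-prefix counts (shared arithmetic vocabulary for both ports)
def pvInd (t v : Int) : Int := if v == t then 1 else 0

def pvPref (a : List (List Int)) (t : Int) (n c : Nat) : Int :=
  ((a.take n).map (fun r => pvInd t (PySem.List.pyGetD r (c : Int) 0))).sum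

def pvDiffL (a : List (List Int)) (t : Int) (g n C : Nat) : List Int :=
  (List.range C).map (fun c => pvPref a t n c - pvPref a t g c)

-- stripe (rows G..D) per-column counts, as functions of the column index
def pvD2 (a : List (List Int)) (G D c : Int) : Int :=
  pvPref a 2 (D.toNat + 1) c.toNat - pvPref a 2 G.toNat c.toNat

def pvD0 (a : List (List Int)) (G D c : Int) : Int :=
  pvPref a 0 (D.toNat + 1) c.toNat - pvPref a 0 G.toNat c.toNat

-- sum of d2 over m columns starting at j
def pvSHf (d2 : Int → Int) (j : Int) (m : Nat) : Int :=
  ∑ t ∈ Finset.range m, d2 (j + (t : Int))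

-- maximal zero-free runs, scan form (A) and gap form (B); runs are (start, end-exclusive)
def pvRuns (flag : Int → Bool) (j c : Int) : Nat → List (Int × Int)
  | 0 => if j < c then [(j, c)] else []
  | n + 1 =>
    if flag c then pvRuns flag j (c + 1) n
    else (if j < c then [(j, c)] else []) ++ pvRuns flag (c + 1) (c + 1) n

def pvGaps (E : Int) : List Int → Int → List (Int × Int)
  | [], j => if j < E then [(j, E)] else []
  | z :: zs, j => (if j < z then [(j, z)] else []) ++ pvGaps E zs (z + 1)

def pvZr (flag : Int → Bool) (c : Int) : Nat → List Int
  | 0 => []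
  | n + 1 => if flag c then pvZr flag (c + 1) n else c :: pvZr flag (c + 1) n

-- candidate made from a run of the stripe (G, D)
def pvMkf (d2 : Int → Int) (G D : Int) (q : Int × Int) : Int × Int × Int × Int × Int × Int :=
  (pvSHf d2 q.1 (q.2 - q.1).toNat, (D - G + 1) * (q.2 - q.1), G, q.1, D, q.2 - 1)

def pvStripe (a : List (List Int)) (C : Nat) (G D : Int) :
    List (Int × Int × Int × Int × Int × Int) :=
  (pvRuns (fun c => pvD0 a G D c == 0) 0 0 C).map (pvMkf (pvD2 a G D) G D)

def pvCands (a : List (List Int)) : List (Int × Int × Int × Int × Int × Int) :=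
  (PySem.List.pyRange 0 (a.length : Int)).flatMap (fun G =>
    (PySem.List.pyRange G (a.length : Int)).flatMap (fun D =>
      pvStripe a (a.headD []).length G D))

-- A's best-update as a binary operation on six-tuples
def pvChallenge (b x : Int × Int × Int × Int × Int × Int) : Int × Int × Int × Int × Int × Int :=
  if x.2.1 ≠ 0 ∧ (x.1 > b.1 ∨ (x.1 = b.1 ∧ x.2.1 > b.2.1)) then x else b

def pvFinalize (a : List (List Int)) (st : Int × Int × Int × Int × Int × Int) :
    List (List Int) :=
  if st.2.1 ≠ 0 then
    (PySem.List.slice a (some st.2.2.1) (some (st.2.2.2.2.1 + 1))).map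
      (fun r => PySem.List.slice r (some st.2.2.2.1) (some (st.2.2.2.2.2 + 1)))
  else []

-- ===== basic prefix lemmas =====
theorem pv_zip_map (f : Int → Int → Int) :
    ∀ (xs ys : List Int), xs.length ≤ ys.length →
    (xs.zip ys).map (fun q => f q.1 q.2)
      = (List.range xs.length).map (fun c => f (xs.getD c 0) (ys.getD c 0)) := by
  intro xs
  induction xs with
  | nil => intro ys h; simp
  | cons x xs ih =>
    intro ys h
    cases ys with
    | nil => simp at h
    | cons y ys =>
      simp only [List.zip_cons_cons, List.map_cons, List.length_cons,
        List.range_succ_eq_map, List.map_map]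
      refine congrArg₂ _ rfl ?_
      rw [ih ys (by simpa using h)]
      simp [Function.comp]

theorem pv_pref_succ (a : List (List Int)) (t : Int) (n c : Nat) (h : n < a.length) :
    pvPref a t (n + 1) c
      = pvPref a t n c + pvInd t (PySem.List.pyGetD (a.getD n []) (c : Int) 0) := by
  unfold pvPref
  simp only [List.getD_eq_getElem?_getD, PySem.List.pyGetD_natCast, List.getD_eq_getElem?_getD]
  rw [List.map_take, List.map_take,
    List.sum_take_succ _ n (by simpa using h)]
  simp [List.getElem?_eq_getElem h]

theorem pv_ind_nonneg (t v : Int) : 0 ≤ pvInd t v := by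
  unfold pvInd; split_ifs <;> omega

theorem pv_pref_mono (a : List (List Int)) (t : Int) (c : Nat) :
    ∀ {g n : Nat}, g ≤ n → pvPref a t g c ≤ pvPref a t n c := by
  intro g n hgn
  unfold pvPref
  rw [show n = g + (n - g) by omega, List.take_add, List.map_append, List.sum_append]
  have : 0 ≤ (((a.drop g).take (n - g)).map
      (fun r => pvInd t (PySem.List.pyGetD r (c : Int) 0))).sum := by
    apply List.sum_nonneg
    intro x hx
    rw [List.mem_map] at hx
    obtain ⟨r, -, rfl⟩ := hx
    exact pv_ind_nonneg _ _
  omega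

theorem pv_d2_nonneg (a : List (List Int)) (G D c : Int) (hGD : G ≤ D + 1) (hG : 0 ≤ G) :
    0 ≤ pvD2 a G D c := by
  unfold pvD2
  have : G.toNat ≤ D.toNat + 1 := by omega
  have := pv_pref_mono a 2 c.toNat this
  omega

theorem pv_diffL_step (a : List (List Int)) (t : Int) (g n C : Nat)
    (hn : n < a.length) (hrow : C ≤ (a.getD n []).length) :
    ((pvDiffL a t g n C).zip (a.getD n [])).map (fun q => q.1 + pvInd t q.2)
      = pvDiffL a t g (n + 1) C := by
  have hlen : (pvDiffL a t g n C).length = C := by simp [pvDiffL]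
  rw [pv_zip_map (fun x v => x + pvInd t v) _ _ (by rw [hlen]; exact hrow)]
  rw [hlen]
  unfold pvDiffL
  apply List.map_congr_left
  intro c hc
  rw [PySem.List.getD_map_range _ _ _ _ (List.mem_range.mp hc)]
  rw [pv_pref_succ a t n c hn]
  have : PySem.List.pyGetD (a.getD n []) (c : Int) 0 = (a.getD n []).getD c 0 :=
    PySem.List.pyGetD_natCast _ _ _
  rw [this]
  ring

theorem pv_diffL_get (a : List (List Int)) (t : Int) (g n C : Nat) (c : Int)
    (h0 : 0 ≤ c) (hc : c < (C : Int)) :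
    PySem.List.pyGetD (pvDiffL a t g n C) c 0 = pvPref a t n c.toNat - pvPref a t g c.toNat := by
  rw [show c = ((c.toNat : Nat) : Int) by omega, PySem.List.pyGetD_natCast]
  unfold pvDiffL
  rw [PySem.List.getD_map_range _ _ _ _ (by omega), Int.toNat_natCast]

theorem pv_diffL_refl (a : List (List Int)) (t : Int) (g C : Nat) :
    pvDiffL a t g g C = List.replicate C 0 := by
  unfold pvDiffL
  simp [List.map_const']

theorem pv_tab_get {β : Type} (L : Nat → β) (K : Nat) (i : Int) (d : β)
    (h0 : 0 ≤ i) (h : i.toNat ≤ K) :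
    PySem.List.pyGetD ((List.range (K + 1)).map (fun n => L n)) i d = L i.toNat := by
  rw [show i = ((i.toNat : Nat) : Int) by omega, PySem.List.pyGetD_natCast,
    List.getD_eq_getElem?_getD, List.getElem?_eq_getElem (by simpa using by omega)]
  simp only [List.getElem_map, List.getElem_range, Option.getD_some, Int.toNat_natCast]

-- ===== A-side: scan = challenge-fold over runs =====
theorem pv_else_step (G D : Int) (hne : D - G + 1 ≠ 0) (A : Int)
    (acc : (Int × Int) × (Int × Int × Int × Int × Int × Int)) :
    (if A - acc.1.2 ≠ 0 ∧ (acc.1.1 > acc.2.1 ∨ (acc.1.1 = acc.2.1 ∧ (D - G + 1) * (A - acc.1.2) > acc.2.2.1)) then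
        (((0 : Int), A + 1), (acc.1.1, (D - G + 1) * (A - acc.1.2), G, acc.1.2, D, A - 1))
      else (((0 : Int), A + 1), acc.2))
    = (((0 : Int), A + 1),
       pvChallenge acc.2 (acc.1.1, (D - G + 1) * (A - acc.1.2), G, acc.1.2, D, A - 1)) := by
  unfold pvChallenge
  by_cases hq : A - acc.1.2 ≠ 0 ∧ (acc.1.1 > acc.2.1 ∨ (acc.1.1 = acc.2.1 ∧ (D - G + 1) * (A - acc.1.2) > acc.2.2.1))
  · rw [if_pos hq, if_pos ⟨mul_ne_zero hne hq.1, hq.2⟩]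
  · rw [if_neg hq, if_neg ?_]
    rintro ⟨ha, hx⟩
    exact hq ⟨fun h0 => ha (by rw [h0, mul_zero]), hx⟩

theorem pv_shf_succ (d2 : Int → Int) (j c : Int) (hj : j ≤ c) :
    pvSHf d2 j (c + 1 - j).toNat = pvSHf d2 j (c - j).toNat + d2 c := by
  unfold pvSHf
  rw [show (c + 1 - j).toNat = (c - j).toNat + 1 by omega, Finset.sum_range_succ,
    show j + ((c - j).toNat : Int) = c by omega]

theorem pvA_scan (C G D : Int) (hne : D - G + 1 ≠ 0) (H I : List Int)
    (d2 : Int → Int) (flag : Int → Bool)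
    (hH : ∀ c, 0 ≤ c → c < C → PySem.List.pyGetD H c 0 = d2 c)
    (hI : ∀ c, 0 ≤ c → c < C → ((PySem.List.pyGetD I c 0 == 0) = flag c)) :
    ∀ (n : Nat) (c j : Int) (best : Int × Int × Int × Int × Int × Int),
      c + n = C → 0 ≤ j → j ≤ c →
    ((PySem.List.pyRange c (C + 1)).foldl
      (fun (t : (Int × Int) × (Int × Int × Int × Int × Int × Int)) A =>
        if A < C ∧ PySem.List.pyGetD I A 0 == 0 then
          ((t.1.1 + PySem.List.pyGetD H A 0, t.1.2), t.2)
        else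
          let Q := A - t.1.2
          let S := (D - G + 1) * Q
          if Q ≠ 0 ∧ (t.1.1 > t.2.1 ∨ (t.1.1 = t.2.1 ∧ S > t.2.2.1)) then
            ((0, A + 1), (t.1.1, S, G, t.1.2, D, A - 1))
          else ((0, A + 1), t.2))
      ((pvSHf d2 j (c - j).toNat, j), best)).2
    = List.foldl pvChallenge best ((pvRuns flag j c n).map (pvMkf d2 G D)) := by
  intro n
  induction n with
  | zero =>
    intro c j best hc hj0 hjc
    have hcC : c = C := by omega
    rw [hcC]
    rw [show PySem.List.pyRange C (C + 1) = C :: PySem.List.pyRange (C + 1) (C + 1) from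
      PySem.List.pyRange_one_cons (by omega),
      PySem.List.pyRange_one_eq_nil (le_refl _)]
    simp only [List.foldl_cons, List.foldl_nil]
    rw [if_neg (by rintro ⟨h, -⟩; exact absurd h (lt_irrefl C))]
    rw [pv_else_step G D hne C ((pvSHf d2 j (C - j).toNat, j), best)]
    unfold pvRuns
    by_cases hjC : j < C
    · rw [if_pos hjC]
      simp only [List.map_cons, List.map_nil, List.foldl_cons, List.foldl_nil]
      unfold pvMkf
      rfl
    · rw [if_neg hjC]
      simp only [List.map_nil, List.foldl_nil]
      have hjeq : j = C := by omega
      subst hjeq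
      unfold pvChallenge
      rw [if_neg (by rintro ⟨h, -⟩; exact h (by ring))]
  | succ n ih =>
    intro c j best hc hj0 hjc
    have hcC : c < C := by omega
    rw [show PySem.List.pyRange c (C + 1) = c :: PySem.List.pyRange (c + 1) (C + 1) from
      PySem.List.pyRange_one_cons (by omega)]
    simp only [List.foldl_cons]
    unfold pvRuns
    by_cases hf : flag c
    · rw [if_pos (show c < C ∧ (PySem.List.pyGetD I c 0 == 0) = true from
        ⟨hcC, by rw [hI c (by omega) hcC]; exact hf⟩)]
      rw [if_pos hf]
      have : pvSHf d2 j (c - j).toNat + PySem.List.pyGetD H c 0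
          = pvSHf d2 j (c + 1 - j).toNat := by
        rw [hH c (by omega) hcC, pv_shf_succ d2 j c hjc]
      rw [show ((pvSHf d2 j (c - j).toNat + PySem.List.pyGetD H c 0, j), best)
          = ((pvSHf d2 j (c + 1 - j).toNat, j), best) from by rw [this]]
      exact ih (c + 1) j best (by omega) hj0 (by omega)
    · rw [if_neg (by
        rintro ⟨-, h⟩
        rw [hI c (by omega) hcC] at h
        exact absurd h (by simpa using hf))]
      rw [if_neg hf]
      rw [pv_else_step G D hne c ((pvSHf d2 j (c - j).toNat, j), best)]
      rw [List.map_append, List.foldl_append]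
      have hstep : List.foldl pvChallenge best ((if j < c then [(j, c)] else []).map (pvMkf d2 G D))
          = pvChallenge best (pvSHf d2 j (c - j).toNat, (D - G + 1) * (c - j), G, j, D, c - 1) := by
        by_cases hjc' : j < c
        · rw [if_pos hjc']
          simp only [List.map_cons, List.map_nil, List.foldl_cons, List.foldl_nil]
          unfold pvMkf
          rfl
        · rw [if_neg hjc']
          have : j = c := by omega
          subst this
          simp only [List.map_nil, List.foldl_nil]
          unfold pvChallenge
          rw [if_neg (by rintro ⟨h, -⟩; exact h (by ring))]
      rw [hstep]
      have h0 : (0 : Int) = pvSHf d2 (c + 1) ((c + 1) - (c + 1)).toNat := by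
        simp [pvSHf]
      rw [show (((0 : Int), c + 1),
            pvChallenge best (pvSHf d2 j (c - j).toNat, (D - G + 1) * (c - j), G, j, D, c - 1))
          = ((pvSHf d2 (c + 1) ((c + 1) - (c + 1)).toNat, c + 1),
            pvChallenge best (pvSHf d2 j (c - j).toNat, (D - G + 1) * (c - j), G, j, D, c - 1)) from by
        rw [← h0]]
      exact ih (c + 1) (c + 1) _ (by omega) (by omega) (le_refl _)

-- middle loop of A: stripes with fixed top row G
theorem pvA_mid (a : List (List Int)) (C : Nat)
    (hrows : ∀ r ∈ a, C ≤ r.length) (g : Nat) :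
    ∀ (k n : Nat), a.length - n = k → g ≤ n →
    ∀ (best : Int × Int × Int × Int × Int × Int),
    ((PySem.List.pyRange (n : Int) (a.length : Int)).foldl
      (fun (s : List Int × List Int × (Int × Int × Int × Int × Int × Int)) D =>
        let row := PySem.List.pyGetD a D []
        let H := (s.1.zip row).map (fun q => q.1 + (if q.2 == 2 then (1 : Int) else 0))
        let I := (s.2.1.zip row).map (fun q => q.1 + (if q.2 == 0 then (1 : Int) else 0))
        let inner := (PySem.List.pyRange 0 ((C : Int) + 1)).foldl
          (fun (t : (Int × Int) × (Int × Int × Int × Int × Int × Int)) A =>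
            if A < (C : Int) ∧ PySem.List.pyGetD I A 0 == 0 then
              ((t.1.1 + PySem.List.pyGetD H A 0, t.1.2), t.2)
            else
              let Q := A - t.1.2
              let S := (D - (g : Int) + 1) * Q
              if Q ≠ 0 ∧ (t.1.1 > t.2.1 ∨ (t.1.1 = t.2.1 ∧ S > t.2.2.1)) then
                ((0, A + 1), (t.1.1, S, (g : Int), t.1.2, D, A - 1))
              else ((0, A + 1), t.2))
          ((0, 0), s.2.2)
        (H, I, inner.2))
      (pvDiffL a 2 g n C, pvDiffL a 0 g n C, best)).2.2
    = (PySem.List.pyRange (n : Int) (a.length : Int)).foldl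
        (fun best D => List.foldl pvChallenge best (pvStripe a C (g : Int) D)) best := by
  intro k
  induction k with
  | zero =>
    intro n hk hgn best
    rw [show PySem.List.pyRange (n : Int) (a.length : Int) = []
      from PySem.List.pyRange_one_eq_nil (by omega)]
    simp
  | succ k ih =>
    intro n hk hgn best
    have hlt : n < a.length := by omega
    rw [show PySem.List.pyRange (n : Int) (a.length : Int)
        = (n : Int) :: PySem.List.pyRange ((n : Int) + 1) (a.length : Int)
      from PySem.List.pyRange_one_cons (by exact_mod_cast hlt)]
    simp only [List.foldl_cons]
    have hrowD : PySem.List.pyGetD a (n : Int) [] = a.getD n [] := PySem.List.pyGetD_natCast a n []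
    have hrlen : C ≤ (a.getD n []).length := by
      apply hrows
      rw [List.getD_eq_getElem a [] hlt]
      exact List.getElem_mem hlt
    have hH2 : ((pvDiffL a 2 g n C).zip (PySem.List.pyGetD a (n : Int) [])).map
        (fun q => q.1 + (if q.2 == 2 then (1 : Int) else 0)) = pvDiffL a 2 g (n + 1) C := by
      rw [hrowD,
        show (fun q : Int × Int => q.1 + (if q.2 == 2 then (1 : Int) else 0))
           = (fun q : Int × Int => q.1 + pvInd 2 q.2) from rfl]
      exact pv_diffL_step a 2 g n C hlt hrlen
    have hH0 : ((pvDiffL a 0 g n C).zip (PySem.List.pyGetD a (n : Int) [])).map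
        (fun q => q.1 + (if q.2 == 0 then (1 : Int) else 0)) = pvDiffL a 0 g (n + 1) C := by
      rw [hrowD,
        show (fun q : Int × Int => q.1 + (if q.2 == 0 then (1 : Int) else 0))
           = (fun q : Int × Int => q.1 + pvInd 0 q.2) from rfl]
      exact pv_diffL_step a 0 g n C hlt hrlen
    rw [hH2, hH0]
    -- the inner C+1 scan at D = n, via pvA_scan
    have hscan := pvA_scan (C : Int) (g : Int) (n : Int) (by omega)
      (pvDiffL a 2 g (n + 1) C) (pvDiffL a 0 g (n + 1) C)
      (pvD2 a (g : Int) (n : Int)) (fun c => pvD0 a (g : Int) (n : Int) c == 0)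
      (fun c h0 hc => by
        rw [pv_diffL_get a 2 g (n + 1) C c h0 hc]
        unfold pvD2
        rw [Int.toNat_natCast, Int.toNat_natCast])
      (fun c h0 hc => by
        rw [pv_diffL_get a 0 g (n + 1) C c h0 hc]
        unfold pvD0
        rw [Int.toNat_natCast, Int.toNat_natCast])
      C 0 0 best (by omega) (le_refl _) (le_refl _)
    rw [show ((0 : Int), (0 : Int))
        = (pvSHf (pvD2 a (g : Int) (n : Int)) 0 ((0 : Int) - 0).toNat, (0 : Int)) from by
      simp [pvSHf]] at *
    rw [hscan]
    have : pvStripe a C (g : Int) (n : Int)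
        = (pvRuns (fun c => pvD0 a (g : Int) (n : Int) c == 0) 0 0 C).map
            (pvMkf (pvD2 a (g : Int) (n : Int)) (g : Int) (n : Int)) := rfl
    rw [← this]
    rw [show ((n : Int) + 1) = ((n + 1 : Nat) : Int) by push_cast; ring]
    exact ih (n + 1) (by omega) (by omega) _

-- A's outer fold, named so it can be unfolded with zeta reduction
def pvA_outer (a : List (List Int)) : Int × Int × Int × Int × Int × Int :=
  let K : Int := a.length
  let C : Int := (PySem.List.pyGetD a 0 []).length
  (PySem.List.pyRange 0 K).foldl (fun st G =>
    let H0 : List Int := List.replicate C.toNat 0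
    let I0 : List Int := List.replicate C.toNat 0
    let r := (PySem.List.pyRange G K).foldl
      (fun (s : List Int × List Int × (Int × Int × Int × Int × Int × Int)) D =>
        let row := PySem.List.pyGetD a D []
        let H := (s.1.zip row).map (fun q => q.1 + (if q.2 == 2 then (1 : Int) else 0))
        let I := (s.2.1.zip row).map (fun q => q.1 + (if q.2 == 0 then (1 : Int) else 0))
        let inner := (PySem.List.pyRange 0 (C + 1)).foldl
          (fun (t : (Int × Int) × (Int × Int × Int × Int × Int × Int)) A =>
            if A < C ∧ PySem.List.pyGetD I A 0 == 0 then
              ((t.1.1 + PySem.List.pyGetD H A 0, t.1.2), t.2)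
            else
              let Q := A - t.1.2
              let S := (D - G + 1) * Q
              if Q ≠ 0 ∧ (t.1.1 > t.2.1 ∨ (t.1.1 = t.2.1 ∧ S > t.2.2.1)) then
                ((0, A + 1), (t.1.1, S, G, t.1.2, D, A - 1))
              else ((0, A + 1), t.2))
          ((0, 0), s.2.2)
        (H, I, inner.2))
      (H0, I0, st)
    r.2.2) ((0, 0, 0, 0, 0, 0) : Int × Int × Int × Int × Int × Int)

-- A as a challenge-fold over the flattened candidate list
theorem pvA_eq (a : List (List Int)) (hne : a ≠ [])
    (hrows : ∀ r ∈ a, (a.headD []).length ≤ r.length) :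
    p a = pvFinalize a (List.foldl pvChallenge (0, 0, 0, 0, 0, 0) (pvCands a)) := by
  have hhead : PySem.List.pyGetD a 0 [] = a.headD [] := by
    cases a with
    | nil => exact absurd rfl hne
    | cons x t => simp [PySem.List.pyGetD_zero]
  have h1 : p a = pvFinalize a (pvA_outer a) := rfl
  rw [h1]
  congr 1
  simp only [pvA_outer, hhead, Int.toNat_natCast]
  rw [PySem.List.foldl_congr_mem _ _
    (fun (st : Int × Int × Int × Int × Int × Int) G =>
      (PySem.List.pyRange G (a.length : Int)).foldl
        (fun best D => List.foldl pvChallenge best (pvStripe a (a.headD []).length G D)) st) _ ?_]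
  · unfold pvCands
    simp only [List.foldl_flatMap]
  · intro st G hG
    obtain ⟨hG0, hGK⟩ := PySem.List.mem_pyRange_one.mp hG
    obtain ⟨g, rfl⟩ : ∃ g : Nat, G = (g : Int) := ⟨G.toNat, by omega⟩
    rw [show (List.replicate ((a.headD []).length) (0 : Int),
          List.replicate ((a.headD []).length) (0 : Int), st)
        = (pvDiffL a 2 g g (a.headD []).length, pvDiffL a 0 g g (a.headD []).length, st) from by
      rw [pv_diffL_refl, pv_diffL_refl]]
    exact pvA_mid a (a.headD []).length hrows g (a.length - g) g rfl (le_refl _) st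

-- ===== B-side: building the candidate list =====
def pvP2 (a : List (List Int)) (r c : Nat) : Int := ∑ j ∈ Finset.range c, pvPref a 2 r j

def pvS2row (a : List (List Int)) (C r : Nat) : List Int :=
  (List.range (C + 1)).map (fun c => pvP2 a r c)

def pvRowP (row : List Int) (c : Nat) : Int :=
  ∑ j ∈ Finset.range c, pvInd 2 (PySem.List.pyGetD row (j : Int) 0)

theorem pv_line (row : List Int) (C : Nat) :
    ∀ (k m : Nat), C - m = k → m ≤ C →
    (PySem.List.pyRange (m : Int) (C : Int)).foldl
      (fun (s : Int × List Int) c =>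
        (s.1 + (if PySem.List.pyGetD row c 0 == 2 then (1 : Int) else 0),
         s.2 ++ [s.1 + (if PySem.List.pyGetD row c 0 == 2 then (1 : Int) else 0)]))
      (pvRowP row m, (List.range (m + 1)).map (fun c => pvRowP row c))
    = (pvRowP row C, (List.range (C + 1)).map (fun c => pvRowP row c)) := by
  intro k
  induction k with
  | zero =>
    intro m hk hm
    have : m = C := by omega
    subst this
    rw [PySem.List.pyRange_one_eq_nil (le_refl _)]
    rfl
  | succ k ih =>
    intro m hk hm
    have hmC : m < C := by omega
    rw [show PySem.List.pyRange (m : Int) (C : Int)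
        = (m : Int) :: PySem.List.pyRange ((m : Int) + 1) (C : Int) from
      PySem.List.pyRange_one_cons (by exact_mod_cast hmC)]
    rw [List.foldl_cons]
    have hstep : pvRowP row m + (if PySem.List.pyGetD row ((m : Nat) : Int) 0 == 2 then (1 : Int) else 0)
        = pvRowP row (m + 1) := by
      unfold pvRowP
      rw [Finset.sum_range_succ]
      rfl
    have hlist : ((List.range (m + 1)).map (fun c => pvRowP row c)) ++ [pvRowP row (m + 1)]
        = (List.range (m + 1 + 1)).map (fun c => pvRowP row c) := by
      simp [List.range_succ]
    rw [show ((m : Int) + 1) = ((m + 1 : Nat) : Int) by push_cast; ring]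
    rw [hstep, hlist]
    exact ih (m + 1) (by omega) (by omega)

theorem pv_getD_neg_one {β : Type} (f : Nat → β) (m : Nat) (d : β) :
    PySem.List.pyGetD ((List.range (m + 1)).map f) (-1) d = f m := by
  simp [PySem.List.pyGetD, PySem.List.pyGet?, PySem.List.pyIdx?]

theorem pv_p2_succ (a : List (List Int)) (m c : Nat) (hm : m < a.length) :
    pvP2 a (m + 1) c = pvP2 a m c + pvRowP (a.getD m []) c := by
  unfold pvP2 pvRowP
  rw [← Finset.sum_add_distrib]
  apply Finset.sum_congr rfl
  intro j _
  exact pv_pref_succ a 2 m j hm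

theorem pv_zip_add (a : List (List Int)) (C m : Nat) (hm : m < a.length) :
    ((pvS2row a C m).zip ((List.range (C + 1)).map (fun c => pvRowP (a.getD m []) c))).map
      (fun q => q.1 + q.2)
    = pvS2row a C (m + 1) := by
  have hlen : (pvS2row a C m).length = C + 1 := by simp [pvS2row]
  rw [pv_zip_map (fun x y => x + y) _ _ (by simp [hlen])]
  rw [hlen]
  unfold pvS2row
  apply List.map_congr_left
  intro c hc
  rw [PySem.List.getD_map_range _ _ _ _ (List.mem_range.mp hc),
    PySem.List.getD_map_range _ _ _ _ (List.mem_range.mp hc),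
    pv_p2_succ a m c hm]

theorem pv_S2 (a : List (List Int)) (C : Nat) :
    ∀ (m : Nat), m ≤ a.length →
    ((a.drop m).foldl (fun (S2 : List (List Int)) row =>
      let al := (PySem.List.pyRange 0 (C : Int)).foldl
        (fun (s : Int × List Int) c =>
          (s.1 + (if PySem.List.pyGetD row c 0 == 2 then (1 : Int) else 0),
           s.2 ++ [s.1 + (if PySem.List.pyGetD row c 0 == 2 then (1 : Int) else 0)]))
        ((0 : Int), ([0] : List Int))
      S2 ++ [((PySem.List.pyGetD S2 (-1) []).zip al.2).map (fun q => q.1 + q.2)])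
      ((List.range (m + 1)).map (fun r => pvS2row a C r)))
    = (List.range (a.length + 1)).map (fun r => pvS2row a C r) := by
  intro m
  induction hk : a.length - m generalizing m with
  | zero =>
    intro hm
    have : m = a.length := by omega
    subst this
    simp
  | succ k ih =>
    intro hm
    have hmlt : m < a.length := by omega
    rw [List.drop_eq_getElem_cons hmlt, List.foldl_cons]
    have hrow : a[m] = a.getD m [] := by rw [List.getD_eq_getElem a [] hmlt]
    simp only [hrow]
    rw [show ((0 : Int), ([0] : List Int))
        = (pvRowP (a.getD m []) 0, (List.range (0 + 1)).map (fun c => pvRowP (a.getD m []) c)) from by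
      simp [pvRowP]]
    have hline := pv_line (a.getD m []) C C 0 (by omega) (by omega)
    rw [Nat.cast_zero] at hline
    rw [hline]
    rw [pv_getD_neg_one (fun r => pvS2row a C r) m []]
    rw [pv_zip_add a C m hmlt]
    rw [show (List.range (m + 1)).map (fun r => pvS2row a C r) ++ [pvS2row a C (m + 1)]
        = (List.range (m + 1 + 1)).map (fun r => pvS2row a C r) from by simp [List.range_succ]]
    exact ih (m + 1) (by omega) (by omega)

theorem pv_s2row_get (a : List (List Int)) (C r : Nat) (i : Int)
    (h0 : 0 ≤ i) (hi : i ≤ (C : Int)) :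
    PySem.List.pyGetD (pvS2row a C r) i 0 = pvP2 a r i.toNat := by
  rw [show i = ((i.toNat : Nat) : Int) by omega, PySem.List.pyGetD_natCast]
  unfold pvS2row
  rw [PySem.List.getD_map_range _ _ _ _ (by omega), Int.toNat_natCast]

theorem pv_sum_range_add (f : Nat → Int) (j m : Nat) :
    ∑ t ∈ Finset.range (j + m), f t
      = (∑ t ∈ Finset.range j, f t) + ∑ t ∈ Finset.range m, f (j + t) := by
  induction m with
  | zero => simp
  | succ m ih => rw [show j + (m + 1) = (j + m) + 1 by omega, Finset.sum_range_succ,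
      Finset.sum_range_succ, ih]; ring

theorem pv_tw (a : List (List Int)) (G D j e : Int) (hG : 0 ≤ G)
    (h0 : 0 ≤ j) (hje : j ≤ e) :
    pvP2 a (D.toNat + 1) e.toNat - pvP2 a (D.toNat + 1) j.toNat
      - pvP2 a G.toNat e.toNat + pvP2 a G.toNat j.toNat
    = pvSHf (pvD2 a G D) j (e - j).toNat := by
  have hsplit : ∀ r : Nat, pvP2 a r e.toNat - pvP2 a r j.toNat
      = ∑ t ∈ Finset.range (e - j).toNat, pvPref a 2 r (j.toNat + t) := by
    intro r
    unfold pvP2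
    rw [show e.toNat = j.toNat + (e - j).toNat by omega,
      pv_sum_range_add (fun c => pvPref a 2 r c) j.toNat (e - j).toNat]
    ring
  rw [show pvP2 a (D.toNat + 1) e.toNat - pvP2 a (D.toNat + 1) j.toNat
      - pvP2 a G.toNat e.toNat + pvP2 a G.toNat j.toNat
    = (pvP2 a (D.toNat + 1) e.toNat - pvP2 a (D.toNat + 1) j.toNat)
      - (pvP2 a G.toNat e.toNat - pvP2 a G.toNat j.toNat) by ring,
    hsplit (D.toNat + 1), hsplit G.toNat]
  unfold pvSHf pvD2
  rw [← Finset.sum_sub_distrib]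
  apply Finset.sum_congr rfl
  intro t _
  rw [show (j + (t : Int)).toNat = j.toNat + t by omega]

-- blocked-set lemmas
theorem pv_mem_blk (P : Int → Bool) :
    ∀ (l : List Int) (s : PySem.Set Int) (x : Int),
    (x ∈ l.foldl (fun b c => if P c then PySem.Set.add b c else b) s)
      ↔ x ∈ s ∨ (x ∈ l ∧ P x) := by
  intro l
  induction l with
  | nil => simp
  | cons c l ih =>
    intro s x
    simp only [List.foldl_cons, List.mem_cons]
    by_cases hc : P c
    · rw [if_pos hc, ih]
      rw [PySem.Set.mem_add]
      constructor
      · rintro ((h | h) | h)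
        · exact Or.inl h
        · exact Or.inr ⟨Or.inl h, h ▸ hc⟩
        · exact Or.inr ⟨Or.inr h.1, h.2⟩
      · rintro (h | ⟨(h | h), hp⟩)
        · exact Or.inl (Or.inl h)
        · exact Or.inl (Or.inr h)
        · exact Or.inr ⟨h, hp⟩
    · rw [if_neg hc, ih]
      constructor
      · rintro (h | h)
        · exact Or.inl h
        · exact Or.inr ⟨Or.inr h.1, h.2⟩
      · rintro (h | ⟨(h | h), hp⟩)
        · exact Or.inl h
        · exact absurd (h ▸ hp) (by simpa using hc)
        · exact Or.inr ⟨h, hp⟩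

theorem pv_nodup_blk (P : Int → Bool) :
    ∀ (l : List Int) (s : PySem.Set Int), s.Nodup →
    (l.foldl (fun b c => if P c then PySem.Set.add b c else b) s).Nodup := by
  intro l
  induction l with
  | nil => intro s h; exact h
  | cons c l ih =>
    intro s h
    simp only [List.foldl_cons]
    by_cases hc : P c
    · rw [if_pos hc]; exact ih _ (PySem.Set.nodup_add s c h)
    · rw [if_neg hc]; exact ih _ h

theorem pv_mem_zr (flag : Int → Bool) :
    ∀ (n : Nat) (c x : Int), x ∈ pvZr flag c n ↔ c ≤ x ∧ x < c + n ∧ flag x = false := by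
  intro n
  induction n with
  | zero => intro c x; simp [pvZr]; omega
  | succ n ih =>
    intro c x
    unfold pvZr
    by_cases hf : flag c
    · rw [if_pos hf, ih]
      constructor
      · rintro ⟨h1, h2, h3⟩; exact ⟨by omega, by push_cast; push_cast at h2; omega, h3⟩
      · rintro ⟨h1, h2, h3⟩
        refine ⟨?_, by push_cast; push_cast at h2; omega, h3⟩
        rcases eq_or_lt_of_le h1 with he | hl
        · exact absurd (he ▸ h3) (by simpa using hf)
        · omega
    · rw [if_neg hf]
      simp only [List.mem_cons, ih]
      constructor
      · rintro (rfl | ⟨h1, h2, h3⟩)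
        · exact ⟨le_refl _, by push_cast; omega, by simpa using hf⟩
        · exact ⟨by omega, by push_cast; push_cast at h2; omega, h3⟩
      · rintro ⟨h1, h2, h3⟩
        rcases eq_or_lt_of_le h1 with he | hl
        · exact Or.inl he.symm
        · exact Or.inr ⟨by omega, by push_cast; push_cast at h2; omega, h3⟩

theorem pv_zr_pairwise (flag : Int → Bool) :
    ∀ (n : Nat) (c : Int), (pvZr flag c n).Pairwise (· < ·) := by
  intro n
  induction n with
  | zero => intro c; simp [pvZr]
  | succ n ih =>
    intro c
    unfold pvZr
    by_cases hf : flag c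
    · rw [if_pos hf]; exact ih (c + 1)
    · rw [if_neg hf]
      refine List.Pairwise.cons ?_ (ih (c + 1))
      intro x hx
      have := (pv_mem_zr flag n (c + 1) x).mp hx
      omega

theorem pv_sorted_blk (blocked : List Int) (C : Nat) (flag : Int → Bool)
    (hnd : blocked.Nodup)
    (hmem : ∀ x, x ∈ blocked ↔ 0 ≤ x ∧ x < (C : Int) ∧ flag x = false) :
    PySem.List.sorted blocked (fun x => x) false = pvZr flag 0 C := by
  apply PySem.List.sorted_eq_of_perm_of_pairwise_lt
  · rw [List.perm_ext_iff_of_nodup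
      ((pv_zr_pairwise flag C 0).imp (fun h => ne_of_lt h)) hnd]
    intro x
    rw [pv_mem_zr, hmem]
    constructor
    · rintro ⟨h1, h2, h3⟩; exact ⟨h1, by omega, h3⟩
    · rintro ⟨h1, h2, h3⟩; exact ⟨h1, by omega, h3⟩
  · exact pv_zr_pairwise flag C 0

theorem pv_runs_gaps (flag : Int → Bool) :
    ∀ (n : Nat) (j c : Int), pvRuns flag j c n = pvGaps (c + n) (pvZr flag c n) j := by
  intro n
  induction n with
  | zero => intro j c; simp [pvRuns, pvZr, pvGaps]
  | succ n ih =>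
    intro j c
    unfold pvRuns pvZr
    by_cases hf : flag c
    · rw [if_pos hf, if_pos hf, ih]
      congr 1
      push_cast
      ring
    · rw [if_neg hf, if_neg hf]
      show _ = pvGaps (c + ((n : Nat) + 1 : Nat)) (c :: pvZr flag (c + 1) n) j
      unfold pvGaps
      rw [ih]
      congr 2 <;> push_cast <;> ring

theorem pv_gaps_mem (E : Int) :
    ∀ (zs : List Int) (j : Int), (∀ z ∈ zs, j ≤ z) → zs.Pairwise (· < ·) →
    (∀ z ∈ zs, z < E) →
    ∀ q ∈ pvGaps E zs j, j ≤ q.1 ∧ q.1 < q.2 ∧ q.2 ≤ E := by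
  intro zs
  induction zs with
  | nil =>
    intro j _ _ _ q hq
    unfold pvGaps at hq
    split_ifs at hq with h
    · simp at hq; subst hq; exact ⟨le_refl _, h, le_refl _⟩
    · simp at hq
  | cons z zs ih =>
    intro j hjz hpw hzE q hq
    rw [List.pairwise_cons] at hpw
    unfold pvGaps at hq
    rw [List.mem_append] at hq
    rcases hq with hq | hq
    · split_ifs at hq with h
      · simp at hq; subst hq
        exact ⟨le_refl _, h, le_of_lt (hzE z (by simp))⟩
      · simp at hq
    · have := ih (z + 1) (fun w hw => by have := hpw.1 w hw; omega) hpw.2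
        (fun w hw => hzE w (by simp [hw])) q hq
      refine ⟨le_trans ?_ this.1, this.2.1, this.2.2⟩
      have := hjz z (by simp)
      omega

theorem pv_pairs (CI : Int) (F : Int × Int → Int × Int × Int × Int × Int × Int) :
    ∀ (zs : List Int) (l : Int) (cs : List (Int × Int × Int × Int × Int × Int)),
    (∀ z ∈ zs, l < z) → zs.Pairwise (· < ·) → (∀ z ∈ zs, z < CI) → l < CI →
    ((l :: (zs ++ [CI])).zip (zs ++ [CI])).foldl
      (fun cs pr => if pr.2 - pr.1 - 1 ≠ 0 then cs ++ [F pr] else cs) cs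
    = cs ++ (pvGaps CI zs (l + 1)).map (fun q => F (q.1 - 1, q.2)) := by
  intro zs
  induction zs with
  | nil =>
    intro l cs _ _ _ hlC
    simp only [List.nil_append, List.zip_cons_cons, List.zip_nil_right,
      List.foldl_cons, List.foldl_nil]
    unfold pvGaps
    by_cases h : l + 1 < CI
    · rw [if_pos (show CI - l - 1 ≠ 0 by omega), if_pos h]
      simp only [List.map_cons, List.map_nil]
      rw [show l + 1 - 1 = l by ring]
    · rw [if_neg (show ¬(CI - l - 1 ≠ 0) by omega), if_neg h]
      simp
  | cons z zs ih =>
    intro l cs hlz hpw hzC hlC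
    rw [List.pairwise_cons] at hpw
    have hz : l < z := hlz z (by simp)
    simp only [List.cons_append, List.zip_cons_cons, List.foldl_cons]
    rw [ih z _ hpw.1 hpw.2 (fun w hw => hzC w (by simp [hw])) (hzC z (by simp))]
    unfold pvGaps
    by_cases h : l + 1 < z
    · rw [if_pos (show z - l - 1 ≠ 0 by omega), if_pos h]
      simp only [List.map_append, List.map_cons, List.map_nil]
      rw [show l + 1 - 1 = l by ring, List.append_assoc]
      cases zs <;> rfl
    · rw [if_neg (show ¬(z - l - 1 ≠ 0) by omega), if_neg h]
      simp only [List.nil_append]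
      cases zs <;> rfl

theorem pvB_mid (a : List (List Int)) (C : Nat)
    (hrows : ∀ r ∈ a, C ≤ r.length) (g : Nat) :
    ∀ (k n : Nat), a.length - n = k → g ≤ n →
    ∀ (blocked : PySem.Set Int) (cs : List (Int × Int × Int × Int × Int × Int)),
    blocked.Nodup →
    (∀ x, x ∈ blocked ↔ 0 ≤ x ∧ x < (C : Int) ∧
      pvPref a 0 n x.toNat - pvPref a 0 g x.toNat ≠ 0) →
    ((PySem.List.pyRange (n : Int) (a.length : Int)).foldl
      (fun (s : PySem.Set Int × List (Int × Int × Int × Int × Int × Int)) D =>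
        (((PySem.List.pyRange 0 (C : Int)).foldl
          (fun (b : PySem.Set Int) c =>
            if PySem.List.pyGetD (PySem.List.pyGetD a D []) c 0 == 0 then PySem.Set.add b c
            else b) s.1),
         ((((-1 : Int) :: (PySem.List.sorted ((PySem.List.pyRange 0 (C : Int)).foldl
              (fun (b : PySem.Set Int) c =>
                if PySem.List.pyGetD (PySem.List.pyGetD a D []) c 0 == 0 then PySem.Set.add b c
                else b) s.1) (fun x => x) false ++ [(C : Int)])).zip
            (PySem.List.sorted ((PySem.List.pyRange 0 (C : Int)).foldl
              (fun (b : PySem.Set Int) c =>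
                if PySem.List.pyGetD (PySem.List.pyGetD a D []) c 0 == 0 then PySem.Set.add b c
                else b) s.1) (fun x => x) false ++ [(C : Int)])).foldl
          (fun cs (pr : Int × Int) =>
            if pr.2 - pr.1 - 1 ≠ 0 then
              cs ++ [(PySem.List.pyGetD (PySem.List.pyGetD ((List.range (a.length + 1)).map (fun r => pvS2row a C r)) (D + 1) []) pr.2 0
                        - PySem.List.pyGetD (PySem.List.pyGetD ((List.range (a.length + 1)).map (fun r => pvS2row a C r)) (D + 1) []) (pr.1 + 1) 0
                        - PySem.List.pyGetD (PySem.List.pyGetD ((List.range (a.length + 1)).map (fun r => pvS2row a C r)) (g : Int) []) pr.2 0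
                        + PySem.List.pyGetD (PySem.List.pyGetD ((List.range (a.length + 1)).map (fun r => pvS2row a C r)) (g : Int) []) (pr.1 + 1) 0,
                      (D - (g : Int) + 1) * (pr.2 - pr.1 - 1), (g : Int), pr.1 + 1, D, pr.2 - 1)]
            else cs) s.2)))
      (blocked, cs)).2
    = cs ++ (PySem.List.pyRange (n : Int) (a.length : Int)).flatMap
        (fun D => pvStripe a C (g : Int) D) := by
  intro k
  induction k with
  | zero =>
    intro n hk hgn blocked cs hnd hmem
    rw [show PySem.List.pyRange (n : Int) (a.length : Int) = []
      from PySem.List.pyRange_one_eq_nil (by omega)]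
    simp
  | succ k ih =>
    intro n hk hgn blocked cs hnd hmem
    have hlt : n < a.length := by omega
    rw [show PySem.List.pyRange (n : Int) (a.length : Int)
        = (n : Int) :: PySem.List.pyRange ((n : Int) + 1) (a.length : Int)
      from PySem.List.pyRange_one_cons (by exact_mod_cast hlt)]
    simp only [List.foldl_cons]
    -- the updated blocked set
    have hnd' := pv_nodup_blk
      (fun c => PySem.List.pyGetD (PySem.List.pyGetD a (n : Int) []) c 0 == 0)
      (PySem.List.pyRange 0 (C : Int)) blocked hnd
    have hmem' : ∀ x, x ∈ (PySem.List.pyRange 0 (C : Int)).foldl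
        (fun (b : PySem.Set Int) c =>
          if PySem.List.pyGetD (PySem.List.pyGetD a (n : Int) []) c 0 == 0 then PySem.Set.add b c
          else b) blocked ↔
        0 ≤ x ∧ x < (C : Int) ∧
          pvPref a 0 (n + 1) x.toNat - pvPref a 0 g x.toNat ≠ 0 := by
      intro x
      rw [pv_mem_blk _ _ _ _, hmem x, PySem.List.mem_pyRange_one]
      constructor
      · rintro (⟨h1, h2, h3⟩ | ⟨⟨h1, h2⟩, h3⟩)
        · refine ⟨h1, h2, ?_⟩
          have hmono := pv_pref_mono a 0 x.toNat hgn
          have hstep := pv_pref_succ a 0 n x.toNat hlt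
          have := pv_ind_nonneg 0 (PySem.List.pyGetD (a.getD n []) ((x.toNat : Nat) : Int) 0)
          omega
        · refine ⟨h1, h2, ?_⟩
          have hmono := pv_pref_mono a 0 x.toNat hgn
          have hstep := pv_pref_succ a 0 n x.toNat hlt
          have hrow : PySem.List.pyGetD a (n : Int) [] = a.getD n [] :=
            PySem.List.pyGetD_natCast a n []
          rw [hrow] at h3
          rw [show ((x.toNat : Nat) : Int) = x by omega] at hstep
          rw [hstep]
          unfold pvInd
          rw [if_pos h3]
          omega
      · rintro ⟨h1, h2, h3⟩
        have hstep := pv_pref_succ a 0 n x.toNat hlt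
        have hrow : PySem.List.pyGetD a (n : Int) [] = a.getD n [] :=
          PySem.List.pyGetD_natCast a n []
        rw [show ((x.toNat : Nat) : Int) = x by omega] at hstep
        by_cases hz : PySem.List.pyGetD (a.getD n []) x 0 == 0
        · exact Or.inr ⟨⟨h1, h2⟩, by rw [hrow]; exact hz⟩
        · refine Or.inl ⟨h1, h2, ?_⟩
          rw [hstep] at h3
          unfold pvInd at h3
          rw [if_neg hz] at h3
          omega
    -- sorted blocked' is the ascending list of zero columns of the stripe
    have hflag : ∀ x : Int, ((fun c => pvD0 a (g : Int) ((n : Nat) : Int) c == 0) x = false) ↔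
        pvPref a 0 (n + 1) x.toNat - pvPref a 0 g x.toNat ≠ 0 := by
      intro x
      unfold pvD0
      rw [Int.toNat_natCast, Int.toNat_natCast]
      simp [sub_eq_zero]
    have hsorted := pv_sorted_blk _ C (fun c => pvD0 a (g : Int) ((n : Nat) : Int) c == 0)
      hnd' (fun x => by rw [hmem' x, hflag x])
    rw [hsorted]
    -- the pair fold produces exactly the stripe candidates
    have hz0 : ∀ z ∈ pvZr (fun c => pvD0 a (g : Int) ((n : Nat) : Int) c == 0) 0 C,
        (0 : Int) ≤ z ∧ z < (C : Int) := by
      intro z hz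
      have := (pv_mem_zr _ C 0 z).mp hz
      omega
    have hpairs := pv_pairs (C : Int)
      (fun pr => (PySem.List.pyGetD (PySem.List.pyGetD ((List.range (a.length + 1)).map (fun r => pvS2row a C r)) (((n : Nat) : Int) + 1) []) pr.2 0
            - PySem.List.pyGetD (PySem.List.pyGetD ((List.range (a.length + 1)).map (fun r => pvS2row a C r)) (((n : Nat) : Int) + 1) []) (pr.1 + 1) 0
            - PySem.List.pyGetD (PySem.List.pyGetD ((List.range (a.length + 1)).map (fun r => pvS2row a C r)) ((g : Nat) : Int) []) pr.2 0
            + PySem.List.pyGetD (PySem.List.pyGetD ((List.range (a.length + 1)).map (fun r => pvS2row a C r)) ((g : Nat) : Int) []) (pr.1 + 1) 0,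
          (((n : Nat) : Int) - ((g : Nat) : Int) + 1) * (pr.2 - pr.1 - 1), ((g : Nat) : Int), pr.1 + 1, ((n : Nat) : Int), pr.2 - 1))
      (pvZr (fun c => pvD0 a (g : Int) ((n : Nat) : Int) c == 0) 0 C) (-1) cs
      (fun z hz => by have := hz0 z hz; omega)
      (pv_zr_pairwise _ C 0)
      (fun z hz => (hz0 z hz).2)
      (by omega)
    rw [show (-1 : Int) + 1 = 0 by ring] at hpairs
    beta_reduce at hpairs
    rw [hpairs]
    -- the mapped gaps are the stripe
    have hstripe : (pvGaps (C : Int)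
        (pvZr (fun c => pvD0 a (g : Int) ((n : Nat) : Int) c == 0) 0 C) 0).map
        (fun q => (PySem.List.pyGetD (PySem.List.pyGetD ((List.range (a.length + 1)).map (fun r => pvS2row a C r)) (((n : Nat) : Int) + 1) []) q.2 0
              - PySem.List.pyGetD (PySem.List.pyGetD ((List.range (a.length + 1)).map (fun r => pvS2row a C r)) (((n : Nat) : Int) + 1) []) ((q.1 - 1) + 1) 0
              - PySem.List.pyGetD (PySem.List.pyGetD ((List.range (a.length + 1)).map (fun r => pvS2row a C r)) ((g : Nat) : Int) []) q.2 0
              + PySem.List.pyGetD (PySem.List.pyGetD ((List.range (a.length + 1)).map (fun r => pvS2row a C r)) ((g : Nat) : Int) []) ((q.1 - 1) + 1) 0,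
            (((n : Nat) : Int) - ((g : Nat) : Int) + 1) * (q.2 - (q.1 - 1) - 1), ((g : Nat) : Int), (q.1 - 1) + 1, ((n : Nat) : Int), q.2 - 1))
        = pvStripe a C (g : Int) ((n : Nat) : Int) := by
      unfold pvStripe
      rw [pv_runs_gaps _ C 0 0]
      rw [show (0 : Int) + ((C : Nat) : Int) = (C : Int) by ring]
      apply List.map_congr_left
      intro q hq
      have hb := pv_gaps_mem (C : Int) _ 0
        (fun z hz => (hz0 z hz).1) (pv_zr_pairwise _ C 0)
        (fun z hz => (hz0 z hz).2) q hq
      rw [show q.1 - 1 + 1 = q.1 by ring, show q.2 - (q.1 - 1) - 1 = q.2 - q.1 by ring]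
      rw [pv_tab_get (fun r => pvS2row a C r) a.length (((n : Nat) : Int) + 1) [] (by omega) (by omega),
        pv_tab_get (fun r => pvS2row a C r) a.length ((g : Nat) : Int) [] (by omega) (by omega)]
      rw [pv_s2row_get a C _ q.2 (by omega) hb.2.2,
        pv_s2row_get a C _ q.1 (by omega) (by omega),
        pv_s2row_get a C _ q.2 (by omega) hb.2.2,
        pv_s2row_get a C _ q.1 (by omega) (by omega)]
      rw [show (((n : Nat) : Int) + 1).toNat = ((n : Nat) : Int).toNat + 1 by omega]
      rw [pv_tw a ((g : Nat) : Int) ((n : Nat) : Int) q.1 q.2 (by omega) (by omega) (by omega)]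
      rfl
    rw [hstripe]
    -- recurse
    rw [show ((n : Int) + 1) = ((n + 1 : Nat) : Int) by push_cast; ring]
    rw [ih (n + 1) (by omega) (by omega) _ _ hnd' (fun x => by rw [hmem' x])]
    rw [List.append_assoc, List.flatMap_cons]

-- B's candidate list, named so it can be unfolded with zeta reduction
def pvB_cands (a : List (List Int)) : List (Int × Int × Int × Int × Int × Int) :=
  let K : Int := a.length
  let C : Int := (PySem.List.pyGetD a 0 []).length
  let S2 := a.foldl (fun (S2 : List (List Int)) row =>
      let al := (PySem.List.pyRange 0 C).foldl
        (fun (s : Int × List Int) c =>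
          (s.1 + (if PySem.List.pyGetD row c 0 == 2 then (1 : Int) else 0),
           s.2 ++ [s.1 + (if PySem.List.pyGetD row c 0 == 2 then (1 : Int) else 0)]))
        ((0 : Int), ([0] : List Int))
      S2 ++ [((PySem.List.pyGetD S2 (-1) []).zip al.2).map (fun q => q.1 + q.2)])
    [List.replicate (C.toNat + 1) (0 : Int)]
  (PySem.List.pyRange 0 K).foldl
    (fun (cs : List (Int × Int × Int × Int × Int × Int)) G =>
      ((PySem.List.pyRange G K).foldl
        (fun (s : PySem.Set Int × List (Int × Int × Int × Int × Int × Int)) D =>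
          let blocked := (PySem.List.pyRange 0 C).foldl
            (fun (b : PySem.Set Int) c =>
              if PySem.List.pyGetD (PySem.List.pyGetD a D []) c 0 == 0 then PySem.Set.add b c
              else b) s.1
          let bounds := [(-1 : Int)] ++ PySem.List.sorted blocked (fun x => x) false ++ [C]
          let cs' := (bounds.zip (bounds.drop 1)).foldl
            (fun cs (pr : Int × Int) =>
              if pr.2 - pr.1 - 1 ≠ 0 then
                cs ++ [(PySem.List.pyGetD (PySem.List.pyGetD S2 (D + 1) []) pr.2 0
                          - PySem.List.pyGetD (PySem.List.pyGetD S2 (D + 1) []) (pr.1 + 1) 0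
                          - PySem.List.pyGetD (PySem.List.pyGetD S2 G []) pr.2 0
                          + PySem.List.pyGetD (PySem.List.pyGetD S2 G []) (pr.1 + 1) 0,
                        (D - G + 1) * (pr.2 - pr.1 - 1), G, pr.1 + 1, D, pr.2 - 1)]
              else cs) s.2
          (blocked, cs')) (PySem.Set.empty, cs)).2) []

theorem pvS2row_zero (a : List (List Int)) (C : Nat) :
    pvS2row a C 0 = List.replicate (C + 1) 0 := by
  simp [pvS2row, pvP2, pvPref, List.map_const']

theorem pvB_cands_eq (a : List (List Int)) (hne : a ≠ [])
    (hrows : ∀ r ∈ a, (a.headD []).length ≤ r.length) :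
    pvB_cands a = pvCands a := by
  have hhead : PySem.List.pyGetD a 0 [] = a.headD [] := by
    cases a with
    | nil => exact absurd rfl hne
    | cons x t => simp [PySem.List.pyGetD_zero]
  simp only [pvB_cands, hhead, Int.toNat_natCast]
  rw [show [List.replicate ((a.headD []).length + 1) (0 : Int)]
      = (List.range (0 + 1)).map (fun r => pvS2row a (a.headD []).length r) from by
    rw [show (0 : Nat) + 1 = 1 from rfl, List.range_one, List.map_cons, List.map_nil,
      pvS2row_zero]]
  have hS2 := pv_S2 a (a.headD []).length 0 (Nat.zero_le _)
  rw [List.drop_zero] at hS2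
  rw [hS2]
  rw [PySem.List.foldl_congr_mem _ _
    (fun (cs : List (Int × Int × Int × Int × Int × Int)) G =>
      cs ++ (PySem.List.pyRange G (a.length : Int)).flatMap
        (fun D => pvStripe a (a.headD []).length G D)) _ ?_]
  · rw [PySem.List.foldl_append_eq_flatMap, List.nil_append]
    rfl
  · intro cs G hG
    obtain ⟨hG0, hGK⟩ := PySem.List.mem_pyRange_one.mp hG
    obtain ⟨g, rfl⟩ : ∃ g : Nat, G = (g : Int) := ⟨G.toNat, by omega⟩
    rw [PySem.List.foldl_congr_mem _ _
      (fun (s : PySem.Set Int × List (Int × Int × Int × Int × Int × Int)) D =>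
        (((PySem.List.pyRange 0 ((a.headD []).length : Int)).foldl
          (fun (b : PySem.Set Int) c =>
            if PySem.List.pyGetD (PySem.List.pyGetD a D []) c 0 == 0 then PySem.Set.add b c
            else b) s.1),
         ((((-1 : Int) :: (PySem.List.sorted ((PySem.List.pyRange 0 ((a.headD []).length : Int)).foldl
              (fun (b : PySem.Set Int) c =>
                if PySem.List.pyGetD (PySem.List.pyGetD a D []) c 0 == 0 then PySem.Set.add b c
                else b) s.1) (fun x => x) false ++ [((a.headD []).length : Int)])).zip
            (PySem.List.sorted ((PySem.List.pyRange 0 ((a.headD []).length : Int)).foldl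
              (fun (b : PySem.Set Int) c =>
                if PySem.List.pyGetD (PySem.List.pyGetD a D []) c 0 == 0 then PySem.Set.add b c
                else b) s.1) (fun x => x) false ++ [((a.headD []).length : Int)])).foldl
          (fun cs (pr : Int × Int) =>
            if pr.2 - pr.1 - 1 ≠ 0 then
              cs ++ [(PySem.List.pyGetD (PySem.List.pyGetD ((List.range (a.length + 1)).map (fun r => pvS2row a (a.headD []).length r)) (D + 1) []) pr.2 0
                        - PySem.List.pyGetD (PySem.List.pyGetD ((List.range (a.length + 1)).map (fun r => pvS2row a (a.headD []).length r)) (D + 1) []) (pr.1 + 1) 0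
                        - PySem.List.pyGetD (PySem.List.pyGetD ((List.range (a.length + 1)).map (fun r => pvS2row a (a.headD []).length r)) ((g : Nat) : Int) []) pr.2 0
                        + PySem.List.pyGetD (PySem.List.pyGetD ((List.range (a.length + 1)).map (fun r => pvS2row a (a.headD []).length r)) ((g : Nat) : Int) []) (pr.1 + 1) 0,
                      (D - ((g : Nat) : Int) + 1) * (pr.2 - pr.1 - 1), ((g : Nat) : Int), pr.1 + 1, D, pr.2 - 1)]
            else cs) s.2)))
      _ ?_]
    · exact pvB_mid a (a.headD []).length hrows g (a.length - g) g rfl (le_refl _)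
        PySem.Set.empty cs List.nodup_nil
        (fun x => by simp [PySem.Set.empty])
    · intro s D hD
      simp only [List.append_assoc, List.singleton_append, List.cons_append, List.nil_append,
        List.drop_one, List.tail_cons]

theorem pvB_eq (a : List (List Int)) (hne : a ≠ [])
    (hrows : ∀ r ∈ a, (a.headD []).length ≤ r.length) :
    p_alt a = (match PySem.List.max2? (pvCands a) (fun t => t.1) (fun t => t.2.1) with
      | none => []
      | some b =>
        (PySem.List.slice a (some b.2.2.1) (some (b.2.2.2.2.1 + 1))).map
          (fun r => PySem.List.slice r (some b.2.2.2.1) (some (b.2.2.2.2.2 + 1)))) := by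
  have h1 : p_alt a = (match PySem.List.max2? (pvB_cands a) (fun t => t.1) (fun t => t.2.1) with
      | none => []
      | some b =>
        (PySem.List.slice a (some b.2.2.1) (some (b.2.2.2.2.1 + 1))).map
          (fun r => PySem.List.slice r (some b.2.2.2.1) (some (b.2.2.2.2.2 + 1)))) := rfl
  rw [h1, pvB_cands_eq a hne hrows]

-- ===== positivity of candidates and the selection glue =====
theorem pv_runs_lt (flag : Int → Bool) :
    ∀ (n : Nat) (j c : Int), 0 ≤ j → j ≤ c →
    ∀ q ∈ pvRuns flag j c n, 0 ≤ q.1 ∧ q.1 < q.2 := by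
  intro n
  induction n with
  | zero =>
    intro j c h0 hjc q hq
    unfold pvRuns at hq
    split_ifs at hq with h
    · simp at hq; subst hq; exact ⟨h0, h⟩
    · simp at hq
  | succ n ih =>
    intro j c h0 hjc q hq
    unfold pvRuns at hq
    by_cases hf : flag c
    · rw [if_pos hf] at hq
      exact ih j (c + 1) h0 (by omega) q hq
    · rw [if_neg hf, List.mem_append] at hq
      rcases hq with hq | hq
      · by_cases hjc' : j < c
        · rw [if_pos hjc'] at hq
          simp at hq
          subst hq
          exact ⟨h0, hjc'⟩
        · rw [if_neg hjc'] at hq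
          simp at hq
      · exact ih (c + 1) (c + 1) (by omega) (le_refl _) q hq

theorem pv_cands_prop (a : List (List Int)) :
    ∀ x ∈ pvCands a, 0 ≤ x.1 ∧ 0 < x.2.1 := by
  intro x hx
  unfold pvCands at hx
  rw [List.mem_flatMap] at hx
  obtain ⟨G, hG, hx⟩ := hx
  rw [List.mem_flatMap] at hx
  obtain ⟨D, hD, hx⟩ := hx
  obtain ⟨hG0, hGK⟩ := PySem.List.mem_pyRange_one.mp hG
  obtain ⟨hGD, hDK⟩ := PySem.List.mem_pyRange_one.mp hD
  unfold pvStripe at hx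
  rw [List.mem_map] at hx
  obtain ⟨q, hq, rfl⟩ := hx
  have hqlt := pv_runs_lt _ _ 0 0 (le_refl _) (le_refl _) q hq
  constructor
  · show 0 ≤ pvSHf (pvD2 a G D) q.1 (q.2 - q.1).toNat
    unfold pvSHf
    apply Finset.sum_nonneg
    intro t _
    exact pv_d2_nonneg a G D _ (by omega) hG0
  · show 0 < (D - G + 1) * (q.2 - q.1)
    have h1 : 0 < D - G + 1 := by omega
    have h2 : 0 < q.2 - q.1 := by omega
    exact mul_pos h1 h2

def pvPick (b x : Int × Int × Int × Int × Int × Int) : Int × Int × Int × Int × Int × Int :=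
  if x.1 > b.1 ∨ (x.1 = b.1 ∧ x.2.1 > b.2.1) then x else b

theorem pv_mstep (m x : Int × Int × Int × Int × Int × Int) :
    (if (decide (m.1 < x.1) || (!decide (x.1 < m.1) && decide (m.2.1 < x.2.1))) = true
      then some x else some m) = some (pvPick m x) := by
  unfold pvPick
  by_cases hc : x.1 > m.1 ∨ (x.1 = m.1 ∧ x.2.1 > m.2.1)
  · rw [if_pos hc, if_pos (by
      simp only [Bool.or_eq_true, Bool.and_eq_true, Bool.not_eq_true',
        decide_eq_true_eq, decide_eq_false_iff_not]
      omega)]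
  · rw [if_neg hc, if_neg (by
      simp only [Bool.or_eq_true, Bool.and_eq_true, Bool.not_eq_true',
        decide_eq_true_eq, decide_eq_false_iff_not]
      omega)]

theorem pv_max2_cons (x : Int × Int × Int × Int × Int × Int)
    (t : List (Int × Int × Int × Int × Int × Int)) :
    PySem.List.max2? (x :: t) (fun v => v.1) (fun v => v.2.1) = some (t.foldl pvPick x) := by
  unfold PySem.List.max2?
  rw [List.foldl_cons]
  show List.foldl _ (some x) t = _
  induction t generalizing x with
  | nil => rfl
  | cons y t ih =>
    rw [List.foldl_cons, List.foldl_cons]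
    show List.foldl _ (if _ then some y else some x) t = _
    rw [pv_mstep x y]
    exact ih (pvPick x y)

theorem pv_ch_eq_pick (b x : Int × Int × Int × Int × Int × Int) (hx : x.2.1 ≠ 0) :
    pvChallenge b x = pvPick b x := by
  unfold pvChallenge pvPick
  by_cases hc : x.1 > b.1 ∨ (x.1 = b.1 ∧ x.2.1 > b.2.1)
  · rw [if_pos ⟨hx, hc⟩, if_pos hc]
  · rw [if_neg (by rintro ⟨-, h⟩; exact hc h), if_neg hc]

theorem pv_foldl_ch_pick (t : List (Int × Int × Int × Int × Int × Int))
    (h : ∀ x ∈ t, x.2.1 ≠ 0) (b : Int × Int × Int × Int × Int × Int) :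
    t.foldl pvChallenge b = t.foldl pvPick b := by
  apply PySem.List.foldl_congr_mem
  intro acc x hx
  exact pv_ch_eq_pick acc x (h x hx)

theorem pv_pick_prop (t : List (Int × Int × Int × Int × Int × Int)) :
    ∀ (b : Int × Int × Int × Int × Int × Int),
    0 ≤ b.1 ∧ 0 < b.2.1 → (∀ x ∈ t, 0 ≤ x.1 ∧ 0 < x.2.1) →
    0 ≤ (t.foldl pvPick b).1 ∧ 0 < (t.foldl pvPick b).2.1 := by
  induction t with
  | nil => intro b hb _; exact hb
  | cons y t ih =>
    intro b hb ht
    rw [List.foldl_cons]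
    refine ih (pvPick b y) ?_ (fun x hx => ht x (by simp [hx]))
    unfold pvPick
    split_ifs
    · exact ht y (by simp)
    · exact hb

theorem pv_glue (a : List (List Int)) (cands : List (Int × Int × Int × Int × Int × Int))
    (h : ∀ x ∈ cands, 0 ≤ x.1 ∧ 0 < x.2.1) :
    pvFinalize a (cands.foldl pvChallenge (0, 0, 0, 0, 0, 0))
    = (match PySem.List.max2? cands (fun t => t.1) (fun t => t.2.1) with
      | none => []
      | some b =>
        (PySem.List.slice a (some b.2.2.1) (some (b.2.2.2.2.1 + 1))).map
          (fun r => PySem.List.slice r (some b.2.2.2.1) (some (b.2.2.2.2.2 + 1)))) := by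
  cases cands with
  | nil => simp [pvFinalize, PySem.List.max2?]
  | cons x t =>
    have hx := h x (by simp)
    rw [pv_max2_cons x t, List.foldl_cons]
    have hfirst : pvChallenge (0, 0, 0, 0, 0, 0) x = x := by
      unfold pvChallenge
      rw [if_pos ?_]
      refine ⟨by omega, ?_⟩
      show x.1 > 0 ∨ (x.1 = 0 ∧ x.2.1 > 0)
      omega
    rw [hfirst, pv_foldl_ch_pick t (fun y hy => by have := h y (by simp [hy]); omega) x]
    have hprop : 0 ≤ (t.foldl pvPick x).1 ∧ 0 < (t.foldl pvPick x).2.1 :=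
      pv_pick_prop t x hx (fun y hy => h y (by simp [hy]))
    unfold pvFinalize
    rw [if_pos (by omega)]

-- ===== assembly =====
theorem pv_main (a : List (List Int)) (hne : a ≠ [])
    (hrows : ∀ r ∈ a, (a.headD []).length ≤ r.length) : p a = p_alt a := by
  rw [pvA_eq a hne hrows, pvB_eq a hne hrows]
  exact pv_glue a (pvCands a) (pv_cands_prop a)

-- ===== VERDICT (by name: the statement is the Claim_ definition above) =====
theorem p_spec : Claim_equal_p := by
  intro a _ hpre
  unfold Spec_p
  exact pv_main a hpre.1 hpre.2
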